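-- pv_equiv track=rewrite | github.com/halogen28372/Tokenizer_Focus | arc_lago_tokenizer.py | is_x_cross
-- ===== SOURCE A (Python) =====
-- from typing import List, Tuple, Dict, Optional, Set
--
-- Point = Tuple[int, int]  # (row, col)
--
-- Box   = Tuple[int, int, int, int]  # (r0, c0, r1, c1) inclusive
--
-- def bbox_of(points: Set[Point]) -> Box:
--     rs = [p[0] for p in points]
--     cs = [p[1] for p in points]
--     return (min(rs), min(cs), max(rs), max(cs))
--
-- def is_x_cross(points: Set[Point]) -> bool:
--     # two diagonals crossing in bbox, near full coverage of those two diagonals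
--     box = bbox_of(points)
--     r0,c0,r1,c1 = box
--     H = r1-r0+1; W = c1-c0+1
--     if H != W or H < 3:
--         return False
--     needed = 2*H - 1
--     diag1 = {(r0+i, c0+i) for i in range(H)}
--     diag2 = {(r0+i, c1-i) for i in range(H)}
--     cov = len((diag1|diag2) & points)
--     return cov >= int(0.9*len(diag1|diag2))
-- ===== SOURCE B (Python) =====
-- def bbox_of(points):
--     rs = [p[0] for p in points]
--     cs = [p[1] for p in points]
--     return (min(rs), min(cs), max(rs), max(cs))
--
-- def is_x_cross(points):
--     # Histogram the points by their two diagonal invariants (r-c and r+c) in one pass,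
--     # then read the coverage off the two buckets by inclusion-exclusion: the main
--     # diagonal of the bbox is the bucket r-c == r0-c0, the anti-diagonal is the bucket
--     # r+c == r0+c1, and they overlap in exactly the centre cell when H is odd.
--     r0, c0, r1, c1 = bbox_of(points)
--     H = r1 - r0 + 1
--     if H != c1 - c0 + 1 or H < 3:
--         return False
--     diff = {}
--     summ = {}
--     for (r, c) in points:
--         diff[r - c] = diff.get(r - c, 0) + 1
--         summ[r + c] = summ.get(r + c, 0) + 1
--     centre = ((r0 + r1) // 2, (c0 + c1) // 2)
--     overlap = 1 if H % 2 and centre in points else 0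
--     cov = diff.get(r0 - c0, 0) + summ.get(r0 + c1, 0) - overlap
--     denom = 2 * H - 1 if H % 2 else 2 * H
--     return cov >= (9 * denom) // 10
-- ===== Notes on version B (the rewrite author's own statement) =====
-- stated objective: alternative
-- what changed: B replaces A's explicitly constructed diagonal point-sets, set union and set intersection by two hash histograms built in one pass over the points (bucketed by the diagonal invariants r-c and r+c); coverage is then read off the two buckets r0-c0 and r0+c1 by inclusion-exclusion (subtracting 1 exactly when H is odd and the centre cell is present), and the union size comes from the parity formula 2H-1 / 2H with the exact integer threshold (9*denom)//10.
import Mathlib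
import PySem

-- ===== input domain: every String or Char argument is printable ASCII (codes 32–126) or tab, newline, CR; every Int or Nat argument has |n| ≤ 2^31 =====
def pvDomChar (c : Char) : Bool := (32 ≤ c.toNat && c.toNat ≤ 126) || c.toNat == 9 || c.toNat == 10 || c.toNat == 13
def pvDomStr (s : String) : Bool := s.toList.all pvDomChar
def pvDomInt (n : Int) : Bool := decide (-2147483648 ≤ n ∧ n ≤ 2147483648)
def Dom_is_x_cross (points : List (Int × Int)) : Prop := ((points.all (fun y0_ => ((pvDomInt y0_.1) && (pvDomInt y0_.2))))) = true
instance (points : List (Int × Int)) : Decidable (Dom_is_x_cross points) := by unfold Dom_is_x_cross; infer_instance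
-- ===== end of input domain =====

-- B replaces A's diagonal-set construction and set intersection by two diagonal-invariant
-- histograms (buckets keyed by r-c and r+c) read off by inclusion-exclusion (objective: simpler).

-- ===== PORT A =====
-- shared helper (both Pythons define the same bbox_of); none = min/max of an empty sequence (ValueError)
def bbox_of (points : List (Int × Int)) : Option (Int × Int × Int × Int) :=
  let rs := points.map (fun p => p.1)
  let cs := points.map (fun p => p.2)
  match PySem.List.min? rs (fun x => x), PySem.List.min? cs (fun x => x),
        PySem.List.max? rs (fun x => x), PySem.List.max? cs (fun x => x) with
  | some a, some b, some c, some d => some (a, b, c, d)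
  | _, _, _, _ => none

def is_x_cross (points : List (Int × Int)) : Bool :=
  match bbox_of points with
  | none => false   -- Python raises ValueError here; excluded by Pre_
  | some (r0, c0, r1, c1) =>
    let H : Int := r1 - r0 + 1
    let W : Int := c1 - c0 + 1
    if H ≠ W ∨ H < 3 then false
    else
      let diag1 : PySem.Set (Int × Int) :=
        PySem.Set.ofList ((PySem.List.pyRange 0 H 1).map (fun i => (r0 + i, c0 + i)))
      let diag2 : PySem.Set (Int × Int) :=
        PySem.Set.ofList ((PySem.List.pyRange 0 H 1).map (fun i => (r0 + i, c1 - i)))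
      let cov : Int := PySem.Set.len (PySem.Set.inter (PySem.Set.union diag1 diag2) points)
      -- int(0.9*n) = (9*n)//10 exactly for every n reachable here (0.9*n is a multiple of
      -- 0.1 held to within an absolute float error far below 0.1 on |n| ≤ 2^34)
      decide (cov ≥ PySem.Int.floordiv (9 * PySem.Set.len (PySem.Set.union diag1 diag2)) 10)

-- ===== PORT B =====
def is_x_cross_alt (points : List (Int × Int)) : Bool :=
  match bbox_of points with
  | none => false   -- Python raises ValueError here; excluded by Pre_
  | some (r0, c0, r1, c1) =>
    let H : Int := r1 - r0 + 1
    if H ≠ c1 - c0 + 1 ∨ H < 3 then false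
    else
      -- one pass building the two diagonal-invariant histograms
      let dd : PySem.Dict Int Int × PySem.Dict Int Int := points.foldl
        (fun dc p =>
          (dc.1.insert (p.1 - p.2) (dc.1.getD (p.1 - p.2) 0 + 1),
           dc.2.insert (p.1 + p.2) (dc.2.getD (p.1 + p.2) 0 + 1)))
        (PySem.Dict.empty, PySem.Dict.empty)
      let centre : Int × Int := (PySem.Int.floordiv (r0 + r1) 2, PySem.Int.floordiv (c0 + c1) 2)
      let overlap : Int := if PySem.Int.mod H 2 ≠ 0 ∧ centre ∈ points then 1 else 0
      let cov : Int := dd.1.getD (r0 - c0) 0 + dd.2.getD (r0 + c1) 0 - overlap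
      let denom : Int := if PySem.Int.mod H 2 ≠ 0 then 2 * H - 1 else 2 * H
      -- exact integer form of int(0.9*denom) (same justification as in port A)
      decide (cov ≥ PySem.Int.floordiv (9 * denom) 10)

-- ===== PRECONDITION & SPEC =====
-- Pre_ excludes the empty input, on which A's bbox_of raises ValueError, and requires the
-- list's elements to be distinct: the Python parameter is a set of points (type convention:
-- the list holds the set's distinct elements).
def Pre_is_x_cross (points : List (Int × Int)) : Prop := points ≠ [] ∧ points.Nodup
instance (points : List (Int × Int)) : Decidable (Pre_is_x_cross points) := by
  unfold Pre_is_x_cross; infer_instance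

def pvWitness_is_x_cross : (List (Int × Int)) := [(0, 0), (1, 1), (2, 2), (0, 2), (2, 0)]

def Spec_is_x_cross (points : List (Int × Int)) (out : Bool) : Prop := out = is_x_cross_alt points
instance (points : List (Int × Int)) (out : Bool) : Decidable (Spec_is_x_cross points out) := by
  unfold Spec_is_x_cross; infer_instance

-- ===== CLAIM (what is proved, stated in full; the proofs are below) =====
def Claim_equal_is_x_cross : Prop := ∀ (points : List (Int × Int)), Dom_is_x_cross points → Pre_is_x_cross points → Spec_is_x_cross points (is_x_cross points)

-- ===== LEMMAS AND PROOFS =====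

theorem mem_diag (r0 c0 H : Int) (p : Int × Int) :
    p ∈ (PySem.List.pyRange 0 H 1).map (fun i => (r0 + i, c0 + i)) ↔
      p.2 - c0 = p.1 - r0 ∧ 0 ≤ p.1 - r0 ∧ p.1 - r0 < H := by
  simp only [List.mem_map, PySem.List.mem_pyRange_one, Prod.ext_iff]
  constructor
  · rintro ⟨i, ⟨h0, hH⟩, h1, h2⟩; omega
  · rintro ⟨h1, h2, h3⟩; exact ⟨p.1 - r0, ⟨h2, h3⟩, by omega, by omega⟩

theorem mem_adiag (r0 c1 H : Int) (p : Int × Int) :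
    p ∈ (PySem.List.pyRange 0 H 1).map (fun i => (r0 + i, c1 - i)) ↔
      p.2 = c1 - (p.1 - r0) ∧ 0 ≤ p.1 - r0 ∧ p.1 - r0 < H := by
  simp only [List.mem_map, PySem.List.mem_pyRange_one, Prod.ext_iff]
  constructor
  · rintro ⟨i, ⟨h0, hH⟩, h1, h2⟩; omega
  · rintro ⟨h1, h2, h3⟩; exact ⟨p.1 - r0, ⟨h2, h3⟩, by omega, by omega⟩

theorem nodup_diag (r0 c0 H : Int) :
    ((PySem.List.pyRange 0 H 1).map (fun i => (r0 + i, c0 + i))).Nodup :=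
  (PySem.List.nodup_pyRange_one 0 H).map (fun a b h => by
    have := (Prod.ext_iff.mp h).1; omega)

theorem nodup_adiag (r0 c1 H : Int) :
    ((PySem.List.pyRange 0 H 1).map (fun i => (r0 + i, c1 - i))).Nodup :=
  (PySem.List.nodup_pyRange_one 0 H).map (fun a b h => by
    have := (Prod.ext_iff.mp h).1; omega)

theorem countP_not_aux (l : List Int) (p : Int → Bool) :
    l.countP (fun x => !(p x)) = l.length - l.countP p := by
  have h : l.length = l.countP p + l.countP (fun a => decide (¬ p a = true)) :=
    List.length_eq_countP_add_countP (l := l) p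
  have h2 : l.countP (fun x => !(p x)) = l.countP (fun a => decide (¬ p a = true)) :=
    List.countP_congr (fun x _ => by cases hp : p x <;> simp)
  omega

theorem countP_diag_hit (H m : Int) (hm : 2 * m = H - 1) (h1 : 0 ≤ m) (h2 : m < H) :
    (PySem.List.pyRange 0 H 1).countP (fun i => decide (2 * i = H - 1)) = 1 := by
  have hcnt : (PySem.List.pyRange 0 H 1).countP (fun i => decide (2 * i = H - 1)) =
      (PySem.List.pyRange 0 H 1).count m := by
    unfold List.count
    apply List.countP_congr
    intro x hx
    rw [Bool.eq_iff_iff]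
    simp only [decide_eq_true_eq, beq_iff_eq, iff_true]
    constructor <;> intro h <;> omega
  rw [hcnt]
  exact List.count_eq_one_of_mem (PySem.List.nodup_pyRange_one 0 H)
    (PySem.List.mem_pyRange_one.mpr ⟨h1, h2⟩)

-- the union of the two diagonals, as the list A builds, has 2H-1 or 2H cells by parity
theorem len_union_diags (r0 c0 r1 c1 : Int) (hHW : r1 - r0 = c1 - c0) (hH : 3 ≤ r1 - r0 + 1) :
    PySem.Set.len (PySem.Set.union
        (PySem.Set.ofList ((PySem.List.pyRange 0 (r1 - r0 + 1) 1).map (fun i => (r0 + i, c0 + i))))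
        (PySem.Set.ofList ((PySem.List.pyRange 0 (r1 - r0 + 1) 1).map (fun i => (r0 + i, c1 - i))))) =
      if PySem.Int.mod (r1 - r0 + 1) 2 ≠ 0 then 2 * (r1 - r0 + 1) - 1 else 2 * (r1 - r0 + 1) := by
  set H : Int := r1 - r0 + 1 with hHdef
  set D1 := (PySem.List.pyRange 0 H 1).map (fun i => (r0 + i, c0 + i)) with hD1
  set D2 := (PySem.List.pyRange 0 H 1).map (fun i => (r0 + i, c1 - i)) with hD2
  rw [PySem.Set.ofList_eq_self_of_nodup _ (nodup_diag r0 c0 H),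
      PySem.Set.ofList_eq_self_of_nodup _ (nodup_adiag r0 c1 H)]
  show PySem.Set.len (PySem.Set.update D1 D2) = _
  rw [PySem.Set.update_eq_append_filter, PySem.Set.ofList_eq_self_of_nodup _ (nodup_adiag r0 c1 H)]
  unfold PySem.Set.len
  rw [List.length_append]
  have hlen1 : D1.length = H.toNat := by
    rw [hD1, List.length_map, PySem.List.length_pyRange_one]; simp
  have hfm : D2.filter (fun y => !(PySem.Set.contains D1 y)) =
      ((PySem.List.pyRange 0 H 1).filter
        (fun i => !(PySem.Set.contains D1 (r0 + i, c1 - i)))).map (fun i => (r0 + i, c1 - i)) := by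
    rw [hD2, List.filter_map]; rfl
  have hcongr : ((PySem.List.pyRange 0 H 1).filter
        (fun i => !(PySem.Set.contains D1 (r0 + i, c1 - i)))) =
      ((PySem.List.pyRange 0 H 1).filter (fun i => !(decide (2 * i = H - 1)))) := by
    apply List.filter_congr
    intro i hi
    have hib := PySem.List.mem_pyRange_one.mp hi
    have hmem : (r0 + i, c1 - i) ∈ D1 ↔ 2 * i = H - 1 := by
      rw [hD1, mem_diag]; constructor
      · rintro ⟨h1, h2, h3⟩; omega
      · intro h; refine ⟨by omega, by omega, by omega⟩
    have hci := PySem.Set.contains_iff D1 (r0 + i, c1 - i)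
    have : PySem.Set.contains D1 (r0 + i, c1 - i) = decide (2 * i = H - 1) := by
      rw [Bool.eq_iff_iff]; simp only [hci, decide_eq_true_eq]; exact hmem
    rw [this]
  rw [hfm, hcongr, List.length_map, List.length_map, ← List.countP_eq_length_filter]
  have hnot := countP_not_aux (PySem.List.pyRange 0 H 1) (fun i => decide (2 * i = H - 1))
  have hmod : PySem.Int.mod H 2 = H % 2 := PySem.Int.mod_eq_emod_of_pos (by omega)
  have hlenr : (PySem.List.pyRange 0 H 1).length = H.toNat := by
    rw [PySem.List.length_pyRange_one]; simp
  by_cases hpar : H % 2 = 1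
  · rw [hnot]
    have hone : (PySem.List.pyRange 0 H 1).countP (fun i => decide (2 * i = H - 1)) = 1 :=
      countP_diag_hit H ((H - 1) / 2) (by omega) (by omega) (by omega)
    simp only [hmod, hpar]
    rw [hone, hlenr]
    have := Int.toNat_of_nonneg (show (0:Int) ≤ H by omega)
    split <;> [skip; omega]
    push_cast
    omega
  · rw [hnot]
    have hcnt : (PySem.List.pyRange 0 H 1).countP (fun i => decide (2 * i = H - 1)) = 0 :=
      List.countP_eq_zero.mpr (fun i _ => by simp only [decide_eq_true_eq]; omega)
    simp only [hmod]
    rw [hcnt, hlenr]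
    have := Int.toNat_of_nonneg (show (0:Int) ≤ H by omega)
    have h2 : H % 2 = 0 := by omega
    simp only [h2]
    norm_num
    omega

-- A's covered-cell count is the number of points on either diagonal (one countP)
theorem cov_A_eq_countP (points : List (Int × Int)) (hnd : points.Nodup)
    (r0 c0 r1 c1 : Int) (hHW : r1 - r0 = c1 - c0)
    (hb : ∀ p ∈ points, r0 ≤ p.1 ∧ p.1 ≤ r1 ∧ c0 ≤ p.2 ∧ p.2 ≤ c1) :
    PySem.Set.len (PySem.Set.inter (PySem.Set.union
        (PySem.Set.ofList ((PySem.List.pyRange 0 (r1 - r0 + 1) 1).map (fun i => (r0 + i, c0 + i))))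
        (PySem.Set.ofList ((PySem.List.pyRange 0 (r1 - r0 + 1) 1).map (fun i => (r0 + i, c1 - i)))))
        points) =
      (points.countP (fun p => p.1 - p.2 == r0 - c0 || p.1 + p.2 == r0 + c1) : Int) := by
  set H : Int := r1 - r0 + 1 with hHdef
  set D1 := (PySem.List.pyRange 0 H 1).map (fun i => (r0 + i, c0 + i)) with hD1
  set D2 := (PySem.List.pyRange 0 H 1).map (fun i => (r0 + i, c1 - i)) with hD2
  rw [PySem.Set.ofList_eq_self_of_nodup _ (nodup_diag r0 c0 H),
      PySem.Set.ofList_eq_self_of_nodup _ (nodup_adiag r0 c1 H)]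
  set U := PySem.Set.union D1 D2 with hU
  have hUnodup : U.Nodup := PySem.Set.nodup_union D1 D2 (nodup_diag r0 c0 H)
  have hUmem : ∀ y : Int × Int, y ∈ U ↔ y ∈ D1 ∨ y ∈ D2 := fun y => PySem.Set.mem_update D1 D2 y
  have hpred : points.countP
        (fun p : Int × Int => p.1 - p.2 == r0 - c0 || p.1 + p.2 == r0 + c1) =
      points.countP (fun p => PySem.Set.contains U p) := by
    apply List.countP_congr
    intro p hp
    have hbp := hb p hp
    have hiff : p ∈ U ↔ (p.1 - p.2 = r0 - c0 ∨ p.1 + p.2 = r0 + c1) := by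
      rw [hUmem p, hD1, hD2, mem_diag, mem_adiag]
      constructor
      · rintro (⟨h1, h2, h3⟩ | ⟨h1, h2, h3⟩)
        · exact Or.inl (by omega)
        · exact Or.inr (by omega)
      · rintro (h | h)
        · exact Or.inl ⟨by omega, by omega, by omega⟩
        · exact Or.inr ⟨by omega, by omega, by omega⟩
    rw [Bool.eq_iff_iff]
    simp only [Bool.or_eq_true, beq_iff_eq, PySem.Set.contains_iff, iff_true]
    exact hiff.symm
  rw [hpred]
  have hperm : (U.filter (fun x => PySem.Set.contains points x)).Perm
      (points.filter (fun p => PySem.Set.contains U p)) := by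
    rw [List.perm_ext_iff_of_nodup (hUnodup.filter _) (hnd.filter _)]
    intro a
    simp only [List.mem_filter, PySem.Set.contains_iff]
    exact ⟨fun ⟨h1, h2⟩ => ⟨h2, h1⟩, fun ⟨h1, h2⟩ => ⟨h2, h1⟩⟩
  show ((U.filter (fun x => PySem.Set.contains points x)).length : Int) = _
  rw [hperm.length_eq, ← List.countP_eq_length_filter]

-- inclusion-exclusion for countP over a disjunction of predicates
theorem countP_or_add_and {α : Type} (l : List α) (a b : α → Bool) :
    l.countP (fun x => a x || b x) + l.countP (fun x => a x && b x) =
      l.countP a + l.countP b := by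
  induction l with
  | nil => simp
  | cons x xs ih =>
    simp only [List.countP_cons]
    cases ha : a x <;> cases hb : b x <;> simp <;> omega

-- each histogram lookup is the countP over the corresponding diagonal invariant
theorem getD_hist (points : List (Int × Int)) (key : Int × Int → Int) (k : Int) :
    (points.foldl (fun d p => d.insert (key p) (d.getD (key p) 0 + 1)) PySem.Dict.empty).getD k 0 =
      (points.countP (fun p => key p == k) : Int) := by
  rw [← List.foldl_map (f := key)
        (g := fun (d : PySem.Dict Int Int) (x : Int) => d.insert x (d.getD x 0 + 1)),
      PySem.Dict.getD_foldl_insert_add_one, PySem.Dict.getD_empty]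
  rw [List.count_eq_countP, List.countP_map]
  norm_num
  exact List.countP_congr (fun p _ => Iff.rfl)

theorem bbox_bounds (points : List (Int × Int)) (hne : points ≠ []) :
    ∃ r0 c0 r1 c1, bbox_of points = some (r0, c0, r1, c1) ∧
      ∀ p ∈ points, r0 ≤ p.1 ∧ p.1 ≤ r1 ∧ c0 ≤ p.2 ∧ p.2 ≤ c1 := by
  have hrs : points.map (fun p => p.1) ≠ [] := by simpa using hne
  have hcs : points.map (fun p => p.2) ≠ [] := by simpa using hne
  cases hm1 : PySem.List.min? (points.map (fun p => p.1)) (fun x => x) with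
  | none => exact absurd ((PySem.List.min?_eq_none_iff _ _).mp hm1) hrs
  | some r0 =>
  cases hm2 : PySem.List.min? (points.map (fun p => p.2)) (fun x => x) with
  | none => exact absurd ((PySem.List.min?_eq_none_iff _ _).mp hm2) hcs
  | some c0 =>
  cases hm3 : PySem.List.max? (points.map (fun p => p.1)) (fun x => x) with
  | none => exact absurd ((PySem.List.max?_eq_none_iff _ _).mp hm3) hrs
  | some r1 =>
  cases hm4 : PySem.List.max? (points.map (fun p => p.2)) (fun x => x) with
  | none => exact absurd ((PySem.List.max?_eq_none_iff _ _).mp hm4) hcs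
  | some c1 =>
  refine ⟨r0, c0, r1, c1, by simp [bbox_of, hm1, hm2, hm3, hm4], fun p hp => ?_⟩
  have h1 := PySem.List.min?_isMin hm1 p.1 (List.mem_map_of_mem hp)
  have h2 := PySem.List.min?_isMin hm2 p.2 (List.mem_map_of_mem hp)
  have h3 := PySem.List.max?_isMax hm3 p.1 (List.mem_map_of_mem hp)
  have h4 := PySem.List.max?_isMax hm4 p.2 (List.mem_map_of_mem hp)
  exact ⟨h1, h3, h2, h4⟩

-- the overlap count: number of points on BOTH diagonals is B's centre test
theorem countP_both (points : List (Int × Int)) (hnd : points.Nodup)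
    (r0 c0 r1 c1 : Int) (hHW : r1 - r0 = c1 - c0) (hH3 : 3 ≤ r1 - r0 + 1) :
    (points.countP (fun p => p.1 - p.2 == r0 - c0 && p.1 + p.2 == r0 + c1) : Int) =
      (if PySem.Int.mod (r1 - r0 + 1) 2 ≠ 0 ∧
          (PySem.Int.floordiv (r0 + r1) 2, PySem.Int.floordiv (c0 + c1) 2) ∈ points
        then 1 else 0) := by
  set H : Int := r1 - r0 + 1 with hHdef
  have hH : 3 ≤ H := hH3
  have hmod : PySem.Int.mod H 2 = H % 2 := PySem.Int.mod_eq_emod_of_pos (by omega)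
  by_cases hpar : H % 2 = 0
  · have hz : points.countP (fun p => p.1 - p.2 == r0 - c0 && p.1 + p.2 == r0 + c1) = 0 :=
      List.countP_eq_zero.mpr (fun p _ => by
        simp only [Bool.and_eq_true, beq_iff_eq, not_and]
        intro h1 h2; omega)
    rw [hz]
    simp [hpar]
  · -- H odd: the centre is exact, and the conjunction pins p to the centre
    have hq1 : PySem.Int.floordiv (r0 + r1) 2 = (r0 + r1) / 2 :=
      PySem.Int.floordiv_eq_ediv_of_pos (by omega)
    have hq2 : PySem.Int.floordiv (c0 + c1) 2 = (c0 + c1) / 2 :=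
      PySem.Int.floordiv_eq_ediv_of_pos (by omega)
    have he1 : 2 * ((r0 + r1) / 2) = r0 + r1 := by omega
    have he2 : 2 * ((c0 + c1) / 2) = c0 + c1 := by omega
    set q1 : Int := (r0 + r1) / 2 with hq1d
    set q2 : Int := (c0 + c1) / 2 with hq2d
    have hpin : ∀ p : Int × Int,
        (p.1 - p.2 == r0 - c0 && p.1 + p.2 == r0 + c1) = (p == (q1, q2)) := by
      intro p
      rw [Bool.eq_iff_iff]
      simp only [Bool.and_eq_true, beq_iff_eq, Prod.ext_iff]
      constructor
      · rintro ⟨h1, h2⟩; constructor <;> omega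
      · rintro ⟨h1, h2⟩; constructor <;> omega
    have hc : points.countP (fun p => p.1 - p.2 == r0 - c0 && p.1 + p.2 == r0 + c1) =
        points.count (q1, q2) := by
      rw [List.count_eq_countP]
      exact List.countP_congr (fun p _ => by rw [hpin p])
    rw [hc]
    simp only [hmod, hq1, hq2]
    by_cases hmem : (q1, q2) ∈ points
    · rw [List.count_eq_one_of_mem hnd hmem]
      simp only [hmem, and_true]
      have : H % 2 ≠ 0 := hpar
      simp [this]
    · rw [List.count_eq_zero.mpr hmem]
      simp [hmem]

theorem main_equiv (points : List (Int × Int)) (hpre : Pre_is_x_cross points) :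
    is_x_cross points = is_x_cross_alt points := by
  obtain ⟨hne, hnd⟩ := hpre
  obtain ⟨r0, c0, r1, c1, hbb, hb⟩ := bbox_bounds points hne
  unfold is_x_cross is_x_cross_alt
  rw [hbb]
  simp only []
  by_cases hc : r1 - r0 + 1 ≠ c1 - c0 + 1 ∨ r1 - r0 + 1 < 3
  · rw [if_pos hc, if_pos hc]
  · rw [if_neg hc, if_neg hc]
    push Not at hc
    have hHW : r1 - r0 = c1 - c0 := by omega
    have hH3 : 3 ≤ r1 - r0 + 1 := by omega
    -- split B's pair-of-histograms loop into its two components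
    rw [PySem.List.foldl_prod_mk
          (f := fun (d : PySem.Dict Int Int) (p : Int × Int) =>
            d.insert (p.1 - p.2) (d.getD (p.1 - p.2) 0 + 1))
          (g := fun (d : PySem.Dict Int Int) (p : Int × Int) =>
            d.insert (p.1 + p.2) (d.getD (p.1 + p.2) 0 + 1))]
    rw [cov_A_eq_countP points hnd r0 c0 r1 c1 hHW hb,
        len_union_diags r0 c0 r1 c1 hHW hH3,
        getD_hist points (fun p => p.1 - p.2) (r0 - c0),
        getD_hist points (fun p => p.1 + p.2) (r0 + c1)]
    have hie := countP_or_add_and points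
      (fun p => p.1 - p.2 == r0 - c0) (fun p => p.1 + p.2 == r0 + c1)
    have hboth := countP_both points hnd r0 c0 r1 c1 hHW hH3
    have hcov : (points.countP
          (fun p => p.1 - p.2 == r0 - c0 || p.1 + p.2 == r0 + c1) : Int) =
        (points.countP (fun p => p.1 - p.2 == r0 - c0) : Int) +
          (points.countP (fun p => p.1 + p.2 == r0 + c1) : Int) -
          (if PySem.Int.mod (r1 - r0 + 1) 2 ≠ 0 ∧
              (PySem.Int.floordiv (r0 + r1) 2, PySem.Int.floordiv (c0 + c1) 2) ∈ points
            then 1 else 0) := by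
      rw [← hboth]
      omega
    rw [hcov]

-- ===== VERDICT (by name: the statement is the Claim_ definition above) =====
theorem is_x_cross_spec : Claim_equal_is_x_cross := by
  intro points _ hpre
  unfold Spec_is_x_cross
  exact main_equiv points hpre
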